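-- pv_equiv track=rewrite | github.com/engrzani/drawscaffold_script | drawscaffold/calculator/price_calculator.py | _total_pricing_materials
-- ===== SOURCE A (Python) =====
-- pricing_materials = [
--     "vert_220cm", "vert_120cm", "l_part", "triangle"
-- ]
--
-- def _total_pricing_materials(material_list: dict) -> int:
--     total = 0
--     for material_name in material_list.keys():
--         if not material_name in pricing_materials:
--             continue
--
--         count = material_list[material_name]
--         total += count
--
--     return total
-- ===== SOURCE B (Python) =====
-- def _total_pricing_materials(material_list: dict) -> int:
--     return (material_list.get("vert_220cm", 0)
--             + material_list.get("vert_120cm", 0)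
--             + material_list.get("l_part", 0)
--             + material_list.get("triangle", 0))
-- ===== Notes on version B (the rewrite author's own statement) =====
-- stated objective: simpler
-- what changed: Replaces A's loop over all dict keys with a loop-free closed form: the sum of four direct material_list.get(name, 0) lookups, one per fixed pricing material.
import Mathlib
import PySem

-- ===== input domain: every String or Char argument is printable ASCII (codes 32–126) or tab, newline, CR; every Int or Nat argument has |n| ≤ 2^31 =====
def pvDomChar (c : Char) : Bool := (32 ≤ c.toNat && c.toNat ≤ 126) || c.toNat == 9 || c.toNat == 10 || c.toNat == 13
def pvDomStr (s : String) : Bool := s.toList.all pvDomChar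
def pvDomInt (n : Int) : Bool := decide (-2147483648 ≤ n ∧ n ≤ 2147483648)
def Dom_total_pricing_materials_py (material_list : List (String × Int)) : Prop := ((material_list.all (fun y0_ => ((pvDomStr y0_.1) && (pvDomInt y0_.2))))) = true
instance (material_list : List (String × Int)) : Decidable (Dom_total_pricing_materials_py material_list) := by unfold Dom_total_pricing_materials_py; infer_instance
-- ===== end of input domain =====

-- B replaces A's scan over all dict keys with a loop-free closed form: four direct lookups added (simpler).

-- ===== PORT A =====
def pricingMaterials : List String :=
  ["vert_220cm", "vert_120cm", "l_part", "triangle"]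

def total_pricing_materials_py (material_list : List (String × Int)) : Int :=
  let d := PySem.Dict.ofList material_list
  d.keys.foldl (fun total material_name =>
    if material_name ∈ pricingMaterials then total + d.getD material_name 0 else total) 0

-- ===== PORT B =====
def total_pricing_materials_py_alt (material_list : List (String × Int)) : Int :=
  let d := PySem.Dict.ofList material_list
  d.getD "vert_220cm" 0 + d.getD "vert_120cm" 0 + d.getD "l_part" 0 + d.getD "triangle" 0

-- ===== PRECONDITION & SPEC =====
def Spec_total_pricing_materials_py (material_list : List (String × Int)) (out : Int) : Prop := out = total_pricing_materials_py_alt material_list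
instance (material_list : List (String × Int)) (out : Int) : Decidable (Spec_total_pricing_materials_py material_list out) := by unfold Spec_total_pricing_materials_py; infer_instance

-- ===== CLAIM (what is proved, stated in full; the proofs are below) =====
def Claim_equal_total_pricing_materials_py : Prop := ∀ (material_list : List (String × Int)), Dom_total_pricing_materials_py material_list → Spec_total_pricing_materials_py material_list (total_pricing_materials_py material_list)

-- ===== LEMMAS AND PROOFS =====
-- foldl with a filtering add equals init plus the sum over the filtered list
theorem pvFoldlFilterSum (ks P : List String) (g : String → Int) (init : Int) :
    ks.foldl (fun t k => if k ∈ P then t + g k else t) init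
      = init + ((ks.filter (fun k => decide (k ∈ P))).map g).sum := by
  induction ks generalizing init with
  | nil => simp
  | cons k ks ih =>
    by_cases h : k ∈ P <;> simp [h, ih, Int.add_assoc]

-- entries absent from the dict contribute 0 to the per-name sum
theorem pvSumFilterContains (d : PySem.Dict String Int) (P : List String) :
    (P.map (fun m => d.getD m 0)).sum
      = ((P.filter (fun m => d.contains m)).map (fun m => d.getD m 0)).sum := by
  induction P with
  | nil => rfl
  | cons m P ih =>
    by_cases h : d.contains m
    · simp [h, ih]
    · simp only [Bool.not_eq_true] at h
      simp [h, ih, PySem.Dict.getD_of_not_contains d 0 h]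

theorem pvPermKeysFilter (d : PySem.Dict String Int) (hnd : d.keys.Nodup) :
    (d.keys.filter (fun k => decide (k ∈ pricingMaterials))).Perm
      (pricingMaterials.filter (fun m => d.contains m)) := by
  rw [List.perm_ext_iff_of_nodup (hnd.filter _) ((by decide : pricingMaterials.Nodup).filter _)]
  intro a
  simp only [List.mem_filter, decide_eq_true_eq, ← PySem.Dict.contains_iff_mem_keys]
  tauto

-- ===== VERDICT (by name: the statement is the Claim_ definition above) =====
theorem total_pricing_materials_py_spec : Claim_equal_total_pricing_materials_py := by
  intro material_list _
  unfold Spec_total_pricing_materials_py total_pricing_materials_py total_pricing_materials_py_alt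
  rw [pvFoldlFilterSum, zero_add,
      List.Perm.sum_eq ((pvPermKeysFilter _ (PySem.Dict.nodup_keys_ofList _)).map _),
      ← pvSumFilterContains]
  simp [pricingMaterials, Int.add_assoc]
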